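-- pv_equiv track=rewrite | github.com/UdhaikumarMohan/Strings-and-Pattern | Remove/dirty_2.py | dirty_2
-- ===== SOURCE A (Python) =====
-- def dirty_2(String,word):
--
--     str =""
--     li = String.lower().split()
--     count=0
--
--     for a in li:
--
--         if (a==word or a[:-1]==word):
--
--             count+=1
--
--             if count>1:
--
--                 str+=a+" "
--
--         else:
--
--             str+=a+" "
--
--
--     return str
-- ===== SOURCE B (Python) =====
-- def dirty_2(String, word):
--     li = String.lower().split()
--     idx = [i for i, a in enumerate(li) if a == word or a[:-1] == word]
--     skip = idx[0] if idx else -1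
--     return ''.join(a + ' ' for i, a in enumerate(li) if i != skip)
-- ===== Notes on version B (the rewrite author's own statement) =====
-- stated objective: simpler
-- what changed: Replaces the single-pass fold with a shared match counter and string concatenation by an explicit match-index table (skip = first matching index or -1) plus a join over the enumerated words filtered by index.
import Mathlib
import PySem

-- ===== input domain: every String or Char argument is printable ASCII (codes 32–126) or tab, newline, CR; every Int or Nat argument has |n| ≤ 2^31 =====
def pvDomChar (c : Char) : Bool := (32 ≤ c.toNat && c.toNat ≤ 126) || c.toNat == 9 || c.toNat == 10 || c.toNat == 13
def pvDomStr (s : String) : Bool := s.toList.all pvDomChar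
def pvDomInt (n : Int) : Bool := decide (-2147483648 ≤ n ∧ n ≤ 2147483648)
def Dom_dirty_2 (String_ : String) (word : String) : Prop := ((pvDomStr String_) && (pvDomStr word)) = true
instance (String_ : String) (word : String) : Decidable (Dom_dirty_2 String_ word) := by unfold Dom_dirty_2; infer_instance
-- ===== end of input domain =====

-- B replaces A's single-pass shared-counter fold with a match-index table (skip = first
-- matching index or -1) and a join over the enumerated words filtered by index (objective: simpler).

-- ===== PORT A =====
-- A's loop: state is (accumulated chars, count); string concatenation kept as List Char append.
def dirty_2 (String_ : String) (word : String) : String :=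
  let li := PySem.Str.split₀ (PySem.Str.lower String_)
  let st := li.foldl (fun (st : List Char × Int) a =>
    if a == word || PySem.Str.slice a none (some (-1)) == word then
      let count := st.2 + 1
      if count > 1 then (st.1 ++ a.toList ++ [' '], count) else (st.1, count)
    else (st.1 ++ a.toList ++ [' '], st.2)) ([], 0)
  String.mk st.1

-- ===== PORT B =====
-- B: idx = indices of matching words; skip = idx[0] or -1; join the words with index ≠ skip.
def dirty_2_alt (String_ : String) (word : String) : String :=
  let li := PySem.Str.split₀ (PySem.Str.lower String_)
  let idx := ((PySem.List.enumerate li 0).filter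
      (fun p => p.2 == word || PySem.Str.slice p.2 none (some (-1)) == word)).map (·.1)
  let skip : Int := match idx.head? with | some i => i | none => -1
  String.mk (((PySem.List.enumerate li 0).filter (fun p => p.1 != skip)).flatMap
      (fun p => p.2.toList ++ [' ']))

-- ===== PRECONDITION & SPEC =====
def Spec_dirty_2 (String_ : String) (word : String) (out : String) : Prop := out = dirty_2_alt String_ word
instance (String_ : String) (word : String) (out : String) : Decidable (Spec_dirty_2 String_ word out) := by unfold Spec_dirty_2; infer_instance

-- ===== CLAIM (what is proved, stated in full; the proofs are below) =====
def Claim_equal_dirty_2 : Prop := ∀ (String_ : String) (word : String), Dom_dirty_2 String_ word → Spec_dirty_2 String_ word (dirty_2 String_ word)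

-- ===== LEMMAS AND PROOFS =====

-- the match test and the emitted chunk of a word
def pvPred (word a : String) : Bool := a == word || PySem.Str.slice a none (some (-1)) == word
def pvEmit (a : String) : List Char := a.toList ++ [' ']

-- reference function: drop the first matching word, emit the rest
def pvRef (word : String) : List String → List Char
  | [] => []
  | a :: t => if pvPred word a then t.flatMap pvEmit else pvEmit a ++ pvRef word t

-- A's fold after the first match (count ≥ 1) appends every remaining word
lemma dirty2_fold_post (word : String) (li : List String) (acc : List Char) (c : Int) (hc : 1 ≤ c) :
    (li.foldl (fun (st : List Char × Int) a =>
      if a == word || PySem.Str.slice a none (some (-1)) == word then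
        let count := st.2 + 1
        if count > 1 then (st.1 ++ a.toList ++ [' '], count) else (st.1, count)
      else (st.1 ++ a.toList ++ [' '], st.2)) (acc, c)).1 = acc ++ li.flatMap pvEmit := by
  induction li generalizing acc c with
  | nil => simp [pvEmit]
  | cons a t ih =>
    simp only [List.foldl_cons, List.flatMap_cons]
    by_cases h : (a == word || PySem.Str.slice a none (some (-1)) == word) = true
    · simp only [h, if_true]
      have : c + 1 > 1 := by omega
      simp only [this, if_true]
      rw [ih _ _ (by omega)]
      simp [pvEmit]
    · simp only [h, if_false, Bool.false_eq_true]
      rw [ih _ _ hc]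
      simp [pvEmit]

-- A's fold from count = 0 computes pvRef
lemma dirty2_fold_eq_ref (word : String) (li : List String) (acc : List Char) :
    (li.foldl (fun (st : List Char × Int) a =>
      if a == word || PySem.Str.slice a none (some (-1)) == word then
        let count := st.2 + 1
        if count > 1 then (st.1 ++ a.toList ++ [' '], count) else (st.1, count)
      else (st.1 ++ a.toList ++ [' '], st.2)) (acc, 0)).1 = acc ++ pvRef word li := by
  induction li generalizing acc with
  | nil => simp [pvRef]
  | cons a t ih =>
    simp only [List.foldl_cons, pvRef]
    by_cases h : (a == word || PySem.Str.slice a none (some (-1)) == word) = true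
    · simp only [h, if_true, pvPred]
      have h01 : ((0 : Int) + 1 > 1) = False := by simp
      rw [if_neg (by omega)]
      have := dirty2_fold_post word t acc (0 + 1) (by omega)
      rw [this]
    · simp only [h, if_false, pvPred, Bool.false_eq_true]
      rw [ih]
      simp [pvEmit]

-- every index in enumerate li s is ≥ s
lemma enumerate_fst_ge {α : Type} (li : List α) (s : Int) (p : Int × α) (hp : p ∈ PySem.List.enumerate li s) :
    s ≤ p.1 := by
  rcases (PySem.List.mem_enumerate_iff li s p).1 hp with ⟨k, hk, rfl⟩
  show s ≤ s + (k : Int)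
  omega

-- filtering index ≠ skip keeps everything when skip < s
lemma filter_ne_skip_all {α : Type} (li : List α) (s skip : Int) (hs : skip < s) :
    (PySem.List.enumerate li s).filter (fun p => p.1 != skip) = PySem.List.enumerate li s := by
  apply List.filter_eq_self.2
  intro p hp
  have := enumerate_fst_ge li s p hp
  simp only [bne_iff_ne, ne_eq]
  omega

lemma flatMap_emit_enumerate (li : List String) (s : Int) :
    (PySem.List.enumerate li s).flatMap (fun p => p.2.toList ++ [' ']) = li.flatMap pvEmit := by
  conv_rhs => rw [← PySem.List.map_snd_enumerate li s]
  rw [List.flatMap_map]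
  rfl

-- B's body computes pvRef, for any start index s
lemma dirty2_alt_eq_ref (word : String) (li : List String) (s : Int) (hs : 0 ≤ s) :
    (((PySem.List.enumerate li s).filter (fun p =>
        p.1 != (match (((PySem.List.enumerate li s).filter
            (fun p => p.2 == word || PySem.Str.slice p.2 none (some (-1)) == word)).map (·.1)).head? with
          | some i => i | none => -1))).flatMap (fun p => p.2.toList ++ [' '])) = pvRef word li := by
  induction li generalizing s with
  | nil => simp [PySem.List.enumerate, pvRef]
  | cons a t ih =>
    rw [PySem.List.enumerate_cons]
    by_cases h : (a == word || PySem.Str.slice a none (some (-1)) == word) = true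
    · -- first match at index s: skip = s; drop (s,a), keep all of t
      simp only [List.filter_cons, h, if_true, List.map_cons, List.head?_cons,
        bne_self_eq_false, Bool.false_eq_true, if_false]
      rw [filter_ne_skip_all t (s + 1) s (by omega)]
      rw [flatMap_emit_enumerate]
      simp [pvRef, pvPred, h]
    · -- no match at s: (s,a) kept, skip comes from t at s+1 (so skip ≠ s)
      simp only [List.filter_cons, h, if_false, Bool.false_eq_true]
      set skip : Int := (match (((PySem.List.enumerate t (s + 1)).filter
          (fun p => p.2 == word || PySem.Str.slice p.2 none (some (-1)) == word)).map (·.1)).head? with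
        | some i => i | none => -1) with hskip
      have hne : (s != skip) = true := by
        simp only [bne_iff_ne, ne_eq]
        rcases hh : (((PySem.List.enumerate t (s + 1)).filter
            (fun p => p.2 == word || PySem.Str.slice p.2 none (some (-1)) == word)).map (·.1)).head? with _ | i
        · rw [hskip, hh]; show ¬ s = (-1 : Int); omega
        · rw [hskip, hh]
          -- i is an index of enumerate t (s+1), hence > s
          have hi : i ∈ ((PySem.List.enumerate t (s + 1)).filter
              (fun p => p.2 == word || PySem.Str.slice p.2 none (some (-1)) == word)).map (·.1) :=
            List.mem_of_mem_head? (by simp [hh])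
          rcases List.mem_map.1 hi with ⟨p, hp, rfl⟩
          have := enumerate_fst_ge t (s + 1) p (List.mem_of_mem_filter hp)
          show ¬ s = p.1
          omega
      simp only [hne, if_true, List.flatMap_cons]
      rw [hskip, ih (s + 1) (by omega)]
      simp [pvRef, pvPred, h, pvEmit]

-- ===== VERDICT (by name: the statement is the Claim_ definition above) =====
theorem dirty_2_spec : Claim_equal_dirty_2 := by
  intro String_ word _
  show dirty_2 String_ word = dirty_2_alt String_ word
  unfold dirty_2 dirty_2_alt
  simp only []
  rw [dirty2_fold_eq_ref, dirty2_alt_eq_ref _ _ _ (by omega)]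
  simp
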